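-- pv_equiv track=rewrite | github.com/SamLee-dedeboy/JT_linking | search_code.py | build_parent_child_dict
-- ===== SOURCE A (Python) =====
-- def parent_code(code_name):
--     if "\\" in code_name:
--         section = code_name.split("\\")
--         parent = "\\".join(section[:-1])
--         return parent
--     else:
--         return None
--
-- def build_parent_child_dict(data):
--     parent_child_dict = {}
--     for element in data:
--         parent = parent_code(element['Name'])
--         if parent is not None:
--             if parent not in parent_child_dict:
--                 parent_child_dict[parent] = []
--             parent_child_dict[parent].append(element['Name'])
--     return parent_child_dict
-- ===== SOURCE B (Python) =====
-- def parent_code(code_name):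
--     if "\\" in code_name:
--         section = code_name.split("\\")
--         parent = "\\".join(section[:-1])
--         return parent
--     else:
--         return None
--
-- def build_parent_child_dict(data):
--     # one pass building a (parent, name) index, then one group-by-parent pass
--     pairs = [(p, e['Name']) for e in data for p in [parent_code(e['Name'])] if p is not None]
--     parents = dict.fromkeys(p for p, _ in pairs)
--     return {p: [n for q, n in pairs if q == p] for p in parents}
-- ===== Notes on version B (the rewrite author's own statement) =====
-- stated objective: alternative
-- what changed: Replaces the incremental dict accumulation (membership test, lazy empty-list insertion, in-place append per element) by building a flat (parent, name) pair index in one comprehension, deduplicating the parents with dict.fromkeys, and emitting each group by a filter over the index.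
import Mathlib
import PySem

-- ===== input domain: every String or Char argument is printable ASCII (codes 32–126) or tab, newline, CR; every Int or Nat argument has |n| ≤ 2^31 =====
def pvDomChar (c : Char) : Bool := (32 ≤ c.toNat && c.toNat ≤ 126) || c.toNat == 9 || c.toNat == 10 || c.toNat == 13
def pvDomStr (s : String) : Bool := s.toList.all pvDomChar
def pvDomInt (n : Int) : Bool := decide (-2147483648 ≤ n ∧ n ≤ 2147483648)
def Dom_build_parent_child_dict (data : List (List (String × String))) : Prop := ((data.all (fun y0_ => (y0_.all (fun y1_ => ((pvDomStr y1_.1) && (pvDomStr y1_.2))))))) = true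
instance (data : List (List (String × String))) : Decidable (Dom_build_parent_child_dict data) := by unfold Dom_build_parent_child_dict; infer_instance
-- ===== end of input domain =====

-- B builds a flat (parent, name) index and groups it, instead of A's incremental dict accumulation;
-- objective: alternative (same result, different decomposition).

-- ===== PORT A =====
-- shared module helper: parent_code(code_name)
def parent_code (code_name : String) : Option String :=
  if PySem.Str.isIn "\\" code_name then
    let sec := (PySem.Str.split? code_name "\\").getD []  -- sep ≠ "", so split? is some
    some (PySem.Str.join "\\" (PySem.List.slice sec none (some (-1))))
  else
    none

-- element['Name'] : first-match association-list lookup ('' only reached outside Pre_, where Python raises KeyError)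
def pvGetName (e : List (String × String)) : String :=
  ((e.find? (fun kv => kv.1 == "Name")).map Prod.snd).getD ""

def build_parent_child_dict (data : List (List (String × String))) : List (String × List String) :=
  (data.foldl
    (fun d e =>
      let name := pvGetName e
      match parent_code name with
      | none => d
      | some parent =>
          let d' := if d.contains parent then d else d.insert parent ([] : List String)
          d'.modify parent [] (fun l => l ++ [name]))
    PySem.Dict.empty).items

-- ===== PORT B =====
def build_parent_child_dict_alt (data : List (List (String × String))) : List (String × List String) :=
  let pairs := data.filterMap (fun e =>
    (parent_code (pvGetName e)).map (fun p => (p, pvGetName e)))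
  let parents := PySem.List.dedup (pairs.map Prod.fst)
  parents.map (fun p => (p, (pairs.filter (fun q => q.1 == p)).map Prod.snd))

-- ===== PRECONDITION & SPEC =====
-- Pre_ excludes exactly the inputs where Python's element['Name'] raises KeyError (an element without a 'Name' key).
def Pre_build_parent_child_dict (data : List (List (String × String))) : Prop :=
  (data.all (fun e => (e.find? (fun kv => kv.1 == "Name")).isSome)) = true
instance (data : List (List (String × String))) : Decidable (Pre_build_parent_child_dict data) := by
  unfold Pre_build_parent_child_dict; infer_instance

def pvWitness_build_parent_child_dict : (List (List (String × String))) :=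
  [[("Name", "a\\b")], [("Name", "a\\c")], [("Name", "a")]]

def Spec_build_parent_child_dict (data : List (List (String × String))) (out : List (String × List String)) : Prop := out = build_parent_child_dict_alt data
instance (data : List (List (String × String))) (out : List (String × List String)) : Decidable (Spec_build_parent_child_dict data out) := by unfold Spec_build_parent_child_dict; infer_instance

-- ===== CLAIM (what is proved, stated in full; the proofs are below) =====
def Claim_equal_build_parent_child_dict : Prop := ∀ (data : List (List (String × String))), Dom_build_parent_child_dict data → Pre_build_parent_child_dict data → Spec_build_parent_child_dict data (build_parent_child_dict data)

-- ===== LEMMAS AND PROOFS =====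

-- the (parent, name) pairs B indexes
def pvPairs (data : List (List (String × String))) : List (String × String) :=
  data.filterMap (fun e => (parent_code (pvGetName e)).map (fun p => (p, pvGetName e)))

-- A's per-element step: the "insert [] if absent, then append" is one modify
theorem pv_step_eq (d : PySem.Dict String (List String)) (p name : String) :
    (let d' := if d.contains p then d else d.insert p ([] : List String)
     d'.modify p [] (fun l => l ++ [name])) = d.modify p [] (fun l => l ++ [name]) := by
  by_cases h : d.contains p = true
  · simp [h]
  · have hf : d.contains p = false := by simpa using h
    simp [PySem.Dict.modify, hf, PySem.Dict.getD_insert_self, PySem.Dict.insert_insert_self,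
      PySem.Dict.getD_of_not_contains]

-- A's whole loop is the modify-fold over the pair index
theorem pv_fold_eq (data : List (List (String × String))) (d : PySem.Dict String (List String)) :
    data.foldl
      (fun d e =>
        let name := pvGetName e
        match parent_code name with
        | none => d
        | some parent =>
            let d' := if d.contains parent then d else d.insert parent ([] : List String)
            d'.modify parent [] (fun l => l ++ [name]))
      d
    = (pvPairs data).foldl (fun d q => d.modify q.1 [] (fun l => l ++ [q.2])) d := by
  induction data generalizing d with
  | nil => simp [pvPairs]
  | cons e rest ih =>
      simp only [List.foldl_cons, pvPairs, List.filterMap_cons]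
      cases h : parent_code (pvGetName e) with
      | none => simpa [h, pvPairs] using ih d
      | some p =>
          simp only [Option.map_some, List.foldl_cons]
          rw [pv_step_eq d p (pvGetName e)]
          simpa [pvPairs] using ih (d.modify p [] (fun l => l ++ [pvGetName e]))

-- ===== VERDICT (by name: the statement is the Claim_ definition above) =====
theorem build_parent_child_dict_spec : Claim_equal_build_parent_child_dict := by
  intro data _ _
  unfold Spec_build_parent_child_dict build_parent_child_dict build_parent_child_dict_alt
  rw [pv_fold_eq]
  have hnd : ((pvPairs data).foldl (fun d q => d.modify q.1 [] (fun l => l ++ [q.2]))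
      PySem.Dict.empty).keys.Nodup := by
    exact PySem.Dict.nodup_keys_foldl_modify_key _ Prod.fst [] (fun _ q l => l ++ [q.2]) _
      (by simp [PySem.Dict.keys_empty])
  rw [PySem.Dict.items_eq_map_keys _ hnd []]
  rw [PySem.Dict.keys_foldl_modify_key (pvPairs data) Prod.fst [] (fun _ q l => l ++ [q.2])]
  simp only [PySem.Dict.getD_foldl_modify_append, PySem.Dict.getD_empty, List.nil_append,
    PySem.List.dedup_eq_ofList, PySem.Dict.keys_empty]
  rfl
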